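-- pv_equiv track=rewrite | github.com/prefeitura-rio/app-mcp-server | src/tools/equipments_tools.py | get_instructions_for_equipments
-- ===== SOURCE A (Python) =====
-- from typing import Optional, List
--
-- def get_instructions_for_equipments(equipments_data: List[dict]) -> str:
--     """
--     Retorna instruções específicas baseadas nos dados dos equipamentos retornados.
--     Analisa múltiplos campos (categoria, esfera, etc.) para determinar instruções apropriadas.
--
--     Args:
--         equipments_data: Lista de equipamentos com seus dados completos
--
--     Returns:
--         String com instruções específicas baseadas nos critérios encontrados
--     """
--     if not equipments_data or not isinstance(equipments_data, list):
--         return "Retorne todos os equipamentos referente a busca do usuario, acompanhado de todas as informacoes disponiveis sobre o equipamento"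
--
--     instructions_parts = []
--
--     # Categorias de pontos de apoio da Defesa Civil
--     apoio_categories = ["PONTOS_DE_APOIO"]
--
--     # Categorias de saúde que requerem instruções específicas
--     health_categories = ["CF", "CMS"]
--     has_health_equipment = any(
--         eq.get("categoria") in health_categories
--         for eq in equipments_data
--     )
--
--     if has_health_equipment:
--         instructions_parts.append("""- Ao apresentar uma unidade de Atenção Primária (CF ou CMS), siga este formato OBRIGATORIAMENTE:
--         1.  **Apresente a equipe de forma personalizada**: Chame-a de "**a sua equipe de saúde da família**" e informe o nome dela.
--         2.  **Forneça APENAS o contato da equipe**: Informe o número de telefone da equipe, deixando claro que o contato é via **WhatsApp**.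
--         3.  **NÃO INFORME** o telefone geral da unidade (CF/CMS) para não confundir o cidadão. Informe apenas se a equipe da família não tiver telefone.
--         4.  Não cite que a unidade é a **mais próxima** ou a **mais indicada**. Apenas informe que é a unidade que atende a região do cidadão.
--         5.  **Explique o papel da equipe**: De forma sucinta, diga que é a equipe responsável por cuidar da saúde dele e de sua família.
--         6.  **Exemplo de como estruturar a resposta**:
--             "A unidade de saúde que atende a sua região é:
--                 - **[Nome da CF/CMS]**
--                 - **Endereço:** [Endereço da CF/CMS]
--                 - **Distância:** [Distância da CF/CMS]
--                 - **Horário de funcionamento:** [Horário de Funcionamento da CF/CMS]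
--             Lá, **a sua equipe de saúde da família**, chamada **[Nome da Equipe]**, é a responsável por cuidar de você e da sua família. Se precisar entrar em contato, o **WhatsApp** da sua equipe é [Número do WhatsApp da Equipe]."
--         7. Caso a distância seja maior ou igual a 1000 metros, informar com a distância em quilômetros ao invés de metros. Formatar número para ter apenas uma casa decimal.""")
--
--     # Verificar se há equipamentos estaduais
--     has_estadual = any(
--         "ESTADUAL" in str(eq.get("esfera", "")).upper()
--         for eq in equipments_data
--     )
--
--     if has_estadual:
--         instructions_parts.append("""- Para equipamentos de esfera ESTADUAL:
--         1. Informe claramente que o equipamento é de responsabilidade do **Governo do Estado do Rio de Janeiro**.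
--         2. Explique que a prefeitura não tem gestão sobre este equipamento e que os dados podem estar desatualizados.""")
--
--     has_apoio = any(
--         eq.get("categoria") in apoio_categories
--         for eq in equipments_data
--     )
--
--     if has_apoio:
--         instructions_parts.append("""- Ao apresentar um Ponto de Apoio da Defesa Civil, siga este formato OBRIGATORIAMENTE:
--         1.  **Contextualize o que é um Ponto de Apoio**: Explique de forma breve que são locais preparados pela Defesa Civil para acolhimento temporário da população em situações de emergência, como enchentes, deslizamentos ou outras situações de risco.
--         2.  **Apresente o equipamento mais próximo** com as seguintes informações:
--             - **Nome do equipamento**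
--             - **Endereço completo** (logradouro, número, bairro)
--             - **Distância**: Caso a distância seja maior ou igual a 1000 metros, informar em quilômetros (com 1 casa decimal). Caso contrário, informar em metros.
--         3.  **Quando procurar um Ponto de Apoio**: Oriente que estes locais devem ser procurados em situações como:
--             - Enchentes ou alagamentos que impossibilitem permanência em casa
--             - Deslizamentos de terra ou risco iminente
--             - Situações de risco estrutural na residência
--         4.  **Contato de Emergência da Defesa Civil**: SEMPRE informe ao final que em caso de emergência, o cidadão pode ligar para a **Defesa Civil no 199** (funciona 24 horas).
--         5.  **Exemplo de como estruturar a resposta**: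
--             "O ponto de apoio mais próximo do seu endereço é:
--                 - **[Nome do Equipamento]**
--                 - **Endereço:** [Endereço Completo]
--                 - **Distância:** [X metros ou X,X km]
--                 - **Horário de funcionamento:** [Horário, se disponível]
--
--             Os pontos de apoio são locais preparados pela Defesa Civil para acolhimento temporário em situações de emergência, como enchentes, deslizamentos ou outras situações de risco.
--
--             **Em caso de emergência, ligue para a Defesa Civil: 199 (funciona 24 horas)**"
--         6. Caso o cidadão esteja em uma situação de emergência iminente (risco de vida, desabamento, afogamento, etc.), oriente PRIMEIRO a ligar para o 199 antes de se deslocar.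
--         """)
--
--     # Se houver instruções específicas, retorná-las combinadas
--     if instructions_parts:
--         return "\n\n".join(instructions_parts)
--
--     # Instruções padrão para outras categorias
--     return "Retorne todos os equipamentos referente a busca do usuario, acompanhado de todas as informacoes disponiveis sobre o equipamento"
-- ===== SOURCE B (Python) =====
-- from typing import Optional, List
--
-- _DEFAULT = "Retorne todos os equipamentos referente a busca do usuario, acompanhado de todas as informacoes disponiveis sobre o equipamento"
--
-- _HEALTH_MSG = """- Ao apresentar uma unidade de Atenção Primária (CF ou CMS), siga este formato OBRIGATORIAMENTE:
--         1.  **Apresente a equipe de forma personalizada**: Chame-a de "**a sua equipe de saúde da família**" e informe o nome dela.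
--         2.  **Forneça APENAS o contato da equipe**: Informe o número de telefone da equipe, deixando claro que o contato é via **WhatsApp**.
--         3.  **NÃO INFORME** o telefone geral da unidade (CF/CMS) para não confundir o cidadão. Informe apenas se a equipe da família não tiver telefone.
--         4.  Não cite que a unidade é a **mais próxima** ou a **mais indicada**. Apenas informe que é a unidade que atende a região do cidadão.
--         5.  **Explique o papel da equipe**: De forma sucinta, diga que é a equipe responsável por cuidar da saúde dele e de sua família.
--         6.  **Exemplo de como estruturar a resposta**:
--             "A unidade de saúde que atende a sua região é:
--                 - **[Nome da CF/CMS]**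
--                 - **Endereço:** [Endereço da CF/CMS]
--                 - **Distância:** [Distância da CF/CMS]
--                 - **Horário de funcionamento:** [Horário de Funcionamento da CF/CMS]
--             Lá, **a sua equipe de saúde da família**, chamada **[Nome da Equipe]**, é a responsável por cuidar de você e da sua família. Se precisar entrar em contato, o **WhatsApp** da sua equipe é [Número do WhatsApp da Equipe]."
--         7. Caso a distância seja maior ou igual a 1000 metros, informar com a distância em quilômetros ao invés de metros. Formatar número para ter apenas uma casa decimal."""
--
-- _ESTADUAL_MSG = """- Para equipamentos de esfera ESTADUAL:
--         1. Informe claramente que o equipamento é de responsabilidade do **Governo do Estado do Rio de Janeiro**.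
--         2. Explique que a prefeitura não tem gestão sobre este equipamento e que os dados podem estar desatualizados."""
--
-- _APOIO_MSG = """- Ao apresentar um Ponto de Apoio da Defesa Civil, siga este formato OBRIGATORIAMENTE:
--         1.  **Contextualize o que é um Ponto de Apoio**: Explique de forma breve que são locais preparados pela Defesa Civil para acolhimento temporário da população em situações de emergência, como enchentes, deslizamentos ou outras situações de risco.
--         2.  **Apresente o equipamento mais próximo** com as seguintes informações:
--             - **Nome do equipamento**
--             - **Endereço completo** (logradouro, número, bairro)
--             - **Distância**: Caso a distância seja maior ou igual a 1000 metros, informar em quilômetros (com 1 casa decimal). Caso contrário, informar em metros.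
--         3.  **Quando procurar um Ponto de Apoio**: Oriente que estes locais devem ser procurados em situações como:
--             - Enchentes ou alagamentos que impossibilitem permanência em casa
--             - Deslizamentos de terra ou risco iminente
--             - Situações de risco estrutural na residência
--         4.  **Contato de Emergência da Defesa Civil**: SEMPRE informe ao final que em caso de emergência, o cidadão pode ligar para a **Defesa Civil no 199** (funciona 24 horas).
--         5.  **Exemplo de como estruturar a resposta**:
--             "O ponto de apoio mais próximo do seu endereço é:
--                 - **[Nome do Equipamento]**
--                 - **Endereço:** [Endereço Completo]
--                 - **Distância:** [X metros ou X,X km]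
--                 - **Horário de funcionamento:** [Horário, se disponível]
--
--             Os pontos de apoio são locais preparados pela Defesa Civil para acolhimento temporário em situações de emergência, como enchentes, deslizamentos ou outras situações de risco.
--
--             **Em caso de emergência, ligue para a Defesa Civil: 199 (funciona 24 horas)**"
--         6. Caso o cidadão esteja em uma situação de emergência iminente (risco de vida, desabamento, afogamento, etc.), oriente PRIMEIRO a ligar para o 199 antes de se deslocar.
--         """
--
--
-- def get_instructions_for_equipments(equipments_data: List[dict]) -> str:
--     if not equipments_data or not isinstance(equipments_data, list):
--         return _DEFAULT
--     # ONE pass over the data, maintaining three flags, with an early exit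
--     # once all three are known to hold.
--     has_health = has_estadual = has_apoio = False
--     for eq in equipments_data:
--         cat = eq.get("categoria")
--         has_health = has_health or cat in ("CF", "CMS")
--         has_estadual = has_estadual or "ESTADUAL" in str(eq.get("esfera", "")).upper()
--         has_apoio = has_apoio or cat == "PONTOS_DE_APOIO"
--         if has_health and has_estadual and has_apoio:
--             break
--     parts = []
--     if has_health:
--         parts.append(_HEALTH_MSG)
--     if has_estadual:
--         parts.append(_ESTADUAL_MSG)
--     if has_apoio:
--         parts.append(_APOIO_MSG)
--     return "\n\n".join(parts) if parts else _DEFAULT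
-- ===== Notes on version B (the rewrite author's own statement) =====
-- stated objective: alternative
-- what changed: Replaced A's three independent any() scans over equipments_data by a single pass that maintains the three flags together and exits early once all three hold; the fixed instruction strings are then appended in the same order.
import Mathlib
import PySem

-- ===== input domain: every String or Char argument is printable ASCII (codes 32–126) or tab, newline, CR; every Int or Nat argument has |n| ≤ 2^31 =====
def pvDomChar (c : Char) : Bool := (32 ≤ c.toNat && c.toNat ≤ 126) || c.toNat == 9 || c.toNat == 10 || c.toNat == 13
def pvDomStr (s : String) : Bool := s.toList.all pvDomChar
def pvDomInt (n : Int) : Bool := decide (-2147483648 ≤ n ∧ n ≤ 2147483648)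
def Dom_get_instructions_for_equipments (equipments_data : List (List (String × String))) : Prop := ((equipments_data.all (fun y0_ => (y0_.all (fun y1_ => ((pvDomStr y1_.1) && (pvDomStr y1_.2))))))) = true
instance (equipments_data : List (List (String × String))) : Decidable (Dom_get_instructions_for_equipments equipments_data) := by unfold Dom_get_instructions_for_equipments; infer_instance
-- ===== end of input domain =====

-- B replaces A's three independent any() scans over the data by a single pass that
-- maintains the three flags together (with an early exit once all hold); objective: alternative/simpler decomposition.

-- The four instruction texts (shared literal data for both ports)
def msgHealth : String := "- Ao apresentar uma unidade de Atenção Primária (CF ou CMS), siga este formato OBRIGATORIAMENTE:\n        1.  **Apresente a equipe de forma personalizada**: Chame-a de \"**a sua equipe de saúde da família**\" e informe o nome dela.\n        2.  **Forneça APENAS o contato da equipe**: Informe o número de telefone da equipe, deixando claro que o contato é via **WhatsApp**.\n        3.  **NÃO INFORME** o telefone geral da unidade (CF/CMS) para não confundir o cidadão. Informe apenas se a equipe da família não tiver telefone.\n        4.  Não cite que a unidade é a **mais próxima** ou a **mais indicada**. Apenas informe que é a unidade que atende a região do cidadão.\n        5.  **Explique o papel da equipe**: De forma sucinta, diga que é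 a equipe responsável por cuidar da saúde dele e de sua família.\n        6.  **Exemplo de como estruturar a resposta**:\n            \"A unidade de saúde que atende a sua região é:\n                - **[Nome da CF/CMS]**\n                - **Endereço:** [Endereço da CF/CMS]\n                - **Distância:** [Distância da CF/CMS]\n                - **Horário de funcionamento:** [Horário de Funcionamento da CF/CMS]\n            Lá, **a sua equipe de saúde da família**, chamada **[Nome da Equipe]**, é a responsável por cuidar de você e da sua família. Se precisar entrar em contato, o **WhatsApp** da sua equipe é [Número do WhatsApp da Equipe].\"\n        7. Caso a distância seja maior ou igual a 1000 metros, informar com a distância em quilômetros ao invés de metros. Formatar número para ter apenas uma casa decimal."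

def msgEstadual : String := "- Para equipamentos de esfera ESTADUAL:\n        1. Informe claramente que o equipamento é de responsabilidade do **Governo do Estado do Rio de Janeiro**.\n        2. Explique que a prefeitura não tem gestão sobre este equipamento e que os dados podem estar desatualizados."

def msgApoio : String := "- Ao apresentar um Ponto de Apoio da Defesa Civil, siga este formato OBRIGATORIAMENTE:\n        1.  **Contextualize o que é um Ponto de Apoio**: Explique de forma breve que são locais preparados pela Defesa Civil para acolhimento temporário da população em situações de emergência, como enchentes, deslizamentos ou outras situações de risco.\n        2.  **Apresente o equipamento mais próximo** com as seguintes informações:\n            - **Nome do equipamento**\n            - **Endereço completo** (logradouro, número, bairro)\n            - **Distância**: Caso a distância seja maior ou igual a 1000 metros, informar em quilômetros (com 1 casa decimal). Caso contrário, informar em metros.\n        3.  **Quando procurar um Ponto de Apoio**: Oriente que estes locais devem ser procurados em situações como:\n            - Enchentes ou alagamentos que impossibilitem permanência em casa\n            - Deslizamentos de terra ou risco iminente\n            - Situações de risco estrutural na residência\n        4.  **Contato de Emergência da Defesa Civil**: SEMPRE informe ao final que em caso de emergência, o cidadão pode ligar para a **Defesa Civil no 199** (funciona 24 horas).\n        5.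  **Exemplo de como estruturar a resposta**:\n            \"O ponto de apoio mais próximo do seu endereço é:\n                - **[Nome do Equipamento]**\n                - **Endereço:** [Endereço Completo]\n                - **Distância:** [X metros ou X,X km]\n                - **Horário de funcionamento:** [Horário, se disponível]\n\n            Os pontos de apoio são locais preparados pela Defesa Civil para acolhimento temporário em situações de emergência, como enchentes, deslizamentos ou outras situações de risco.\n\n            **Em caso de emergência, ligue para a Defesa Civil: 199 (funciona 24 horas)**\"\n        6. Caso o cidadão esteja em uma situação de emergência iminente (risco de vida, desabamento, afogamento, etc.), oriente PRIMEIRO a ligar para o 199 antes de se deslocar.\n        "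

def msgDefault : String := "Retorne todos os equipamentos referente a busca do usuario, acompanhado de todas as informacoes disponiveis sobre o equipamento"

-- ===== PORT A =====
-- 'x in list_of_strings' for an Optional value (None is in no list of strings)
def pyOptIn (o : Option String) (l : List String) : Bool :=
  match o with
  | some c => l.contains c
  | none => false

def get_instructions_for_equipments (equipments_data : List (List (String × String))) : String :=
  if equipments_data = [] then
    msgDefault
  else
    let instructions_parts : List String := []
    let apoio_categories : List String := ["PONTOS_DE_APOIO"]
    let health_categories : List String := ["CF", "CMS"]
    let has_health_equipment :=
      equipments_data.any (fun eq => pyOptIn ((PySem.Dict.mk eq).get? "categoria") health_categories)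
    let instructions_parts :=
      if has_health_equipment then instructions_parts ++ [msgHealth] else instructions_parts
    let has_estadual :=
      equipments_data.any (fun eq =>
        PySem.Str.isIn "ESTADUAL" (PySem.Str.upper ((PySem.Dict.mk eq).getD "esfera" "")))
    let instructions_parts :=
      if has_estadual then instructions_parts ++ [msgEstadual] else instructions_parts
    let has_apoio :=
      equipments_data.any (fun eq => pyOptIn ((PySem.Dict.mk eq).get? "categoria") apoio_categories)
    let instructions_parts :=
      if has_apoio then instructions_parts ++ [msgApoio] else instructions_parts
    if instructions_parts ≠ [] then PySem.Str.join "\n\n" instructions_parts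
    else msgDefault

-- ===== PORT B =====
-- one pass over the data maintaining the three flags, breaking once all three hold
def altLoop : List (List (String × String)) → Bool → Bool → Bool → Bool × Bool × Bool
  | [], h, e, a => (h, e, a)
  | eq :: rest, h, e, a =>
    let cat := (PySem.Dict.mk eq).get? "categoria"
    let h := h || (cat == some "CF" || cat == some "CMS")
    let e := e || PySem.Str.isIn "ESTADUAL" (PySem.Str.upper ((PySem.Dict.mk eq).getD "esfera" ""))
    let a := a || (cat == some "PONTOS_DE_APOIO")
    if h && e && a then (h, e, a) else altLoop rest h e a

def get_instructions_for_equipments_alt (equipments_data : List (List (String × String))) : String :=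
  if equipments_data = [] then
    msgDefault
  else
    let flags := altLoop equipments_data false false false
    let parts : List String :=
      (if flags.1 then [msgHealth] else []) ++
      (if flags.2.1 then [msgEstadual] else []) ++
      (if flags.2.2 then [msgApoio] else [])
    if parts ≠ [] then PySem.Str.join "\n\n" parts else msgDefault

-- ===== PRECONDITION & SPEC =====
def Spec_get_instructions_for_equipments (equipments_data : List (List (String × String))) (out : String) : Prop := out = get_instructions_for_equipments_alt equipments_data
instance (equipments_data : List (List (String × String))) (out : String) : Decidable (Spec_get_instructions_for_equipments equipments_data out) := by unfold Spec_get_instructions_for_equipments; infer_instance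

-- ===== CLAIM (what is proved, stated in full; the proofs are below) =====
def Claim_equal_get_instructions_for_equipments : Prop := ∀ (equipments_data : List (List (String × String))), Dom_get_instructions_for_equipments equipments_data → Spec_get_instructions_for_equipments equipments_data (get_instructions_for_equipments equipments_data)

-- ===== LEMMAS AND PROOFS =====

def pHealth (eq : List (String × String)) : Bool :=
  pyOptIn ((PySem.Dict.mk eq).get? "categoria") ["CF", "CMS"]

def pEst (eq : List (String × String)) : Bool :=
  PySem.Str.isIn "ESTADUAL" (PySem.Str.upper ((PySem.Dict.mk eq).getD "esfera" ""))

def pApoio (eq : List (String × String)) : Bool :=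
  pyOptIn ((PySem.Dict.mk eq).get? "categoria") ["PONTOS_DE_APOIO"]

theorem altLoop_eq_any (l : List (List (String × String))) (h e a : Bool) :
    altLoop l h e a = (h || l.any pHealth, e || l.any pEst, a || l.any pApoio) := by
  induction l generalizing h e a with
  | nil => simp [altLoop]
  | cons eq rest ih =>
    simp only [altLoop, List.any_cons]
    have hH : (((PySem.Dict.mk eq).get? "categoria") == some "CF" ||
        ((PySem.Dict.mk eq).get? "categoria") == some "CMS") = pHealth eq := by
      simp only [pHealth, pyOptIn]
      cases (PySem.Dict.mk eq).get? "categoria" <;> simp [beq_eq_decide]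
    have hA : (((PySem.Dict.mk eq).get? "categoria") == some "PONTOS_DE_APOIO") = pApoio eq := by
      simp only [pApoio, pyOptIn]
      cases (PySem.Dict.mk eq).get? "categoria" <;> simp [beq_eq_decide]
    rw [hH, hA]
    split
    · next hall =>
      simp only [Bool.and_eq_true] at hall
      obtain ⟨⟨h1, h2⟩, h3⟩ := hall
      simp only [pEst, Prod.mk.injEq]
      refine ⟨?_, ?_, ?_⟩
      · rw [← Bool.or_assoc, h1]; simp
      · rw [← Bool.or_assoc, h2]; simp
      · rw [← Bool.or_assoc, h3]; simp
    · rw [ih]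
      simp [pEst, Bool.or_assoc]

theorem get_instructions_for_equipments_spec : Claim_equal_get_instructions_for_equipments := by
  intro equipments_data _
  unfold Spec_get_instructions_for_equipments
  unfold get_instructions_for_equipments get_instructions_for_equipments_alt
  by_cases hnil : equipments_data = []
  · rw [if_pos hnil, if_pos hnil]
  · rw [if_neg hnil, if_neg hnil, altLoop_eq_any]
    simp only [Bool.false_or]
    rw [show (fun eq => pyOptIn ((PySem.Dict.mk eq).get? "categoria") ["CF", "CMS"]) = pHealth from rfl,
       show (fun eq => PySem.Str.isIn "ESTADUAL" (PySem.Str.upper ((PySem.Dict.mk eq).getD "esfera" ""))) = pEst from rfl,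
       show (fun eq => pyOptIn ((PySem.Dict.mk eq).get? "categoria") ["PONTOS_DE_APOIO"]) = pApoio from rfl]
    cases hh : equipments_data.any pHealth <;>
      cases he : equipments_data.any pEst <;>
        cases ha : equipments_data.any pApoio <;>
          simp
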